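-- pv_equiv track=rewrite | github.com/RTroshin/Codewars | Python/7 kyu/Array - squareUp b!.py | square_up
-- ===== SOURCE A (Python) =====
-- def square_up(n):
--     res_lst_1 = []
--     res_lst_2 = []
--
--     for i in range(1, n + 1):
--         for j in range(1, n + 1):
--             res_lst_1.append(j) if i >= j else res_lst_1.append(0)
--         res_lst_2 += res_lst_1[::-1]
--         res_lst_1 = []
--
--     return res_lst_2
-- ===== SOURCE B (Python) =====
-- def square_up(n):
--     return [x for i in range(1, n + 1)
--               for x in [0] * (n - i) + list(range(i, 0, -1))]
-- ===== Notes on version B (the rewrite author's own statement) =====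
-- stated objective: simpler
-- what changed: Each row is built directly as a zero-prefix segment plus a descending range and the rows are flattened, removing the inner per-element j-loop, the i>=j conditional and the slice reversal.
import Mathlib
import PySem

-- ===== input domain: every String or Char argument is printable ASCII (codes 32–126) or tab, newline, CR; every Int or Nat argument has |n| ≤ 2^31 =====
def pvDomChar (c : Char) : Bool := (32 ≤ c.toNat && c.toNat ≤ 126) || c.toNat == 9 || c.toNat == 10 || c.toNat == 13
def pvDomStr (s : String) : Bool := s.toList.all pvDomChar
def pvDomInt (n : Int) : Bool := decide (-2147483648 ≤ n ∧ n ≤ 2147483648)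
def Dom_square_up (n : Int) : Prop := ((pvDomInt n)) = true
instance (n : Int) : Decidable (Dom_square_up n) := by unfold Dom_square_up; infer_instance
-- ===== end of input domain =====

-- B builds each row directly as a zero-prefix plus a descending range and flattens the rows
-- (no inner j-loop, no conditional, no reversal); objective: simpler.

-- ===== PORT A =====
-- res_lst_1[::-1] is an exact full reversal, ported as Array.reverse; Python lists with O(1)
-- append are represented as Array (push/append), converted to List at the end.
def square_up (n : Int) : List Int :=
  ((PySem.List.pyRange 1 (n + 1) 1).foldl
    (fun res_lst_2 i =>
      let res_lst_1 :=
        (PySem.List.pyRange 1 (n + 1) 1).foldl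
          (fun res_lst_1 j => if i ≥ j then res_lst_1.push j else res_lst_1.push 0)
          (#[] : Array Int)
      res_lst_2 ++ res_lst_1.reverse) (#[] : Array Int)).toList

-- ===== PORT B =====
def square_up_alt (n : Int) : List Int :=
  (PySem.List.pyRange 1 (n + 1) 1).flatMap
    (fun i => List.replicate (n - i).toNat 0 ++ PySem.List.pyRange i 0 (-1))

-- ===== PRECONDITION & SPEC =====
def Spec_square_up (n : Int) (out : List Int) : Prop := out = square_up_alt n
instance (n : Int) (out : List Int) : Decidable (Spec_square_up n out) := by unfold Spec_square_up; infer_instance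

-- ===== CLAIM (what is proved, stated in full; the proofs are below) =====
def Claim_equal_square_up : Prop := ∀ (n : Int), Dom_square_up n → Spec_square_up n (square_up n)

-- ===== LEMMAS AND PROOFS =====

-- A's row (j-or-0 per element, then reversed) equals B's row (zero prefix + countdown).
theorem pv_row_eq (i : Int) (k : Nat) (hi : 1 ≤ i) :
    (PySem.List.pyRange (i + k) 0 (-1)).map (fun j => if i ≥ j then j else (0 : Int))
      = List.replicate k 0 ++ PySem.List.pyRange i 0 (-1) := by
  induction k with
  | zero =>
      simp only [Nat.cast_zero, add_zero, List.replicate, List.nil_append]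
      rw [List.map_congr_left (g := id), List.map_id]
      intro j hj
      rw [PySem.List.mem_pyRange_neg_one] at hj
      simp [ge_iff_le, hj.2]
  | succ k ih =>
      have h1 : (0 : Int) < i + (k + 1 : Nat) := by push_cast; omega
      rw [PySem.List.pyRange_neg_one_cons h1]
      have h2 : i + (k + 1 : Nat) - 1 = i + (k : Nat) := by push_cast; ring
      rw [List.map_cons, h2, ih]
      have h3 : ¬ (i + ((k + 1 : Nat) : Int) ≤ i) := by push_cast; omega
      simp only [ge_iff_le, if_neg h3, List.replicate_succ, List.cons_append]

theorem pv_push_toList (l : List Int) (g : Int → Int) (r : Array Int) :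
    (l.foldl (fun a x => a.push (g x)) r).toList = r.toList ++ l.map g := by
  induction l generalizing r with
  | nil => simp
  | cons x xs ih => simp [List.foldl_cons]

theorem pv_append_toList (l : List Int) (g : Int → Array Int) (r : Array Int) :
    (l.foldl (fun a i => a ++ g i) r).toList
      = r.toList ++ l.flatMap (fun i => (g i).toList) := by
  induction l generalizing r with
  | nil => simp
  | cons x xs ih => simp [List.foldl_cons, ih]

theorem pv_main (n : Int) : square_up n = square_up_alt n := by
  unfold square_up square_up_alt
  rw [pv_append_toList]
  simp only [List.nil_append]
  apply List.flatMap_congr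
  intro i hi
  rw [PySem.List.mem_pyRange_one] at hi
  have hfun : (fun (r : Array Int) j => if i ≥ j then r.push j else r.push 0)
      = (fun r j => r.push (if i ≥ j then j else 0)) := by
    funext r j; split <;> rfl
  rw [hfun, Array.toList_reverse, pv_push_toList, Array.toList_empty, List.nil_append,
      ← List.map_reverse]
  have hrev : PySem.List.pyRange n 0 (-1) = (PySem.List.pyRange 1 (n + 1) 1).reverse := by
    simpa using PySem.List.pyRange_neg_one_eq_reverse (a := n) (b := 0)
  rw [← hrev]
  have h := pv_row_eq i (n - i).toNat hi.1
  have hm : i + ((n - i).toNat : Int) = n := by omega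
  rw [hm] at h
  exact h

-- ===== VERDICT (by name: the statement is the Claim_ definition above) =====
theorem square_up_spec : Claim_equal_square_up := by
  intro n _
  unfold Spec_square_up
  exact pv_main n
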